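-- pv_equiv track=rewrite | github.com/CaceresB/How-Many-Words- | main.py | mTable
-- ===== SOURCE A (Python) =====
-- from math import ceil
--
-- def mTable(oList):
--   mLetters = len(max(oList,key=len))
--   if mLetters<20:
--     nTable=[[] for i in range(mLetters)]
--   else:
--     nTable=[[] for i in range(20)]
--   r = len(nTable)
--   for i in oList:
--     numC = ceil(len(i)/20)
--     for j in range(numC):
--       for k in range(r):
--         if (j*r+k)<len(i):
--           nTable[k]+= [i[j*20+k]]
--         else:
--           nTable[k] +=[""]
--   return nTable
-- ===== SOURCE B (Python) =====
-- from math import ceil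
--
-- def mTable(oList):
--   mLetters = max(len(w) for w in oList)
--   r = mLetters if mLetters < 20 else 20
--   # row-major intermediate: one row of width r per 20-char chunk of each word
--   rows = []
--   for w in oList:
--     for j in range(ceil(len(w)/20)):
--       rows.append([w[j*20+k] if j*20+k < len(w) else "" for k in range(r)])
--   # transpose into columns
--   return [[row[k] for row in rows] for k in range(r)]
-- ===== Notes on version B (the rewrite author's own statement) =====
-- stated objective: alternative
-- what changed: A appends each character directly into its destination column inside a triple nested loop over words/chunks/columns; B first builds a row-major grid (one width-r row per 20-char chunk) and then transposes it into columns in a separate pass.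
import Mathlib
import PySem

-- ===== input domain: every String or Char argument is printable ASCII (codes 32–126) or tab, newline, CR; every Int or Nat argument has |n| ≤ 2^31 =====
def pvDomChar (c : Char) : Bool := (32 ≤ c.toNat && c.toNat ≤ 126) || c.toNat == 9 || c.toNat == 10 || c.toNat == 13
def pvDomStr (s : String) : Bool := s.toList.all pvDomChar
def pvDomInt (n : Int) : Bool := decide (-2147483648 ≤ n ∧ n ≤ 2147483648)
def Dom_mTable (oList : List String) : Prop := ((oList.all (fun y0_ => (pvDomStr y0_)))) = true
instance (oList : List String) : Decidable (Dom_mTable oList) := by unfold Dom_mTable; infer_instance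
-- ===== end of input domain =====

-- B replaces A's direct column-append triple loop by a row-major grid build followed by a transpose (alternative decomposition, same cost).

-- math.ceil(n/20) for a Python int n ≥ 0 equals (n+19)/20 exactly (both ports' Pythons compute ceil(len/20))
def pvCeil20 (n : Nat) : Nat := (n + 19) / 20

-- w[idx]: the 1-char string at index idx; exact whenever idx < w.length (every use below is guarded in range)
def pvCharAt (w : String) (idx : Nat) : String := (w.toList.getD idx ' ').toString

-- ===== PORT A =====
def mTable (oList : List String) : List (List String) :=
  let mLetters := ((PySem.List.max? oList (fun w => w.length)).getD "").length
  let nTable := if mLetters < 20 then List.replicate mLetters ([] : List String)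
                else List.replicate 20 ([] : List String)
  let r := nTable.length
  oList.foldl (fun tbl i =>
    let numC := pvCeil20 i.length
    (List.range numC).foldl (fun tbl j =>
      (List.range r).foldl (fun tbl k =>
        if j * r + k < i.length then
          tbl.set k (tbl.getD k [] ++ [pvCharAt i (j * 20 + k)])
        else
          tbl.set k (tbl.getD k [] ++ [""])) tbl) tbl) nTable

-- ===== PORT B =====
-- one row of width r for chunk j of word w (entry k = w[j*20+k] or "")
def pvRow (w : String) (r j : Nat) : List String :=
  (List.range r).map (fun k => if j * 20 + k < w.length then pvCharAt w (j * 20 + k) else "")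

def mTable_alt (oList : List String) : List (List String) :=
  let mLetters := (PySem.List.max? (oList.map String.length) (fun x => x)).getD 0
  let r := if mLetters < 20 then mLetters else 20
  let rows := oList.foldl (fun acc w =>
      (List.range (pvCeil20 w.length)).foldl (fun acc j => acc ++ [pvRow w r j]) acc) []
  (List.range r).map (fun k => rows.map (fun row => row.getD k ""))

-- ===== PRECONDITION & SPEC =====
-- Pre_ excludes only the empty list, on which A raises ValueError (max of an empty sequence).
def Pre_mTable (oList : List String) : Prop := oList ≠ []
instance (oList : List String) : Decidable (Pre_mTable oList) := by unfold Pre_mTable; infer_instance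
def pvWitness_mTable : List String := (["ab"])
def Spec_mTable (oList : List String) (out : List (List String)) : Prop := out = mTable_alt oList
instance (oList : List String) (out : List (List String)) : Decidable (Spec_mTable oList out) := by unfold Spec_mTable; infer_instance

-- ===== CLAIM (what is proved, stated in full; the proofs are below) =====
def Claim_equal_mTable : Prop := ∀ (oList : List String), Dom_mTable oList → Pre_mTable oList → Spec_mTable oList (mTable oList)

-- ===== LEMMAS AND PROOFS =====

-- abstract view of A's inner k-loop: one "cell function" appended across all r columns
def pvStepR (r : Nat) (c : Nat → String) (tbl : List (List String)) : List (List String) :=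
  (List.range r).foldl (fun tbl k => tbl.set k (tbl.getD k [] ++ [c k])) tbl

def pvCellA (r : Nat) (w : String) (j k : Nat) : String :=
  if j * r + k < w.length then pvCharAt w (j * 20 + k) else ""

def pvCellB (w : String) (j k : Nat) : String :=
  if j * 20 + k < w.length then pvCharAt w (j * 20 + k) else ""

def pvCellsA (r : Nat) (ws : List String) : List (Nat → String) :=
  ws.flatMap (fun w => (List.range (pvCeil20 w.length)).map (fun j => pvCellA r w j))

def pvCellsB (ws : List String) : List (Nat → String) :=
  ws.flatMap (fun w => (List.range (pvCeil20 w.length)).map (fun j => pvCellB w j))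

theorem pv_foldl_set_length (c : Nat → String) (ks : List Nat) (cols : List (List String)) :
    (ks.foldl (fun tbl k => tbl.set k (tbl.getD k [] ++ [c k])) cols).length = cols.length := by
  induction ks generalizing cols with
  | nil => rfl
  | cons k ks ih => rw [List.foldl_cons, ih]; simp

theorem pvStepR_length (r : Nat) (c : Nat → String) (tbl : List (List String)) :
    (pvStepR r c tbl).length = tbl.length := pv_foldl_set_length c _ tbl

theorem pvStepR_getD (r : Nat) (c : Nat → String) (cols : List (List String)) (hr : r ≤ cols.length) (idx : Nat)
    (hidx : idx < cols.length) :
    (pvStepR r c cols).getD idx [] = if idx < r then cols.getD idx [] ++ [c idx] else cols.getD idx [] := by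
  unfold pvStepR
  induction r generalizing idx with
  | zero => simp
  | succ r ih =>
    have hr' : r ≤ cols.length := Nat.le_of_succ_le hr
    rw [List.range_succ, List.foldl_append]
    set prev := (List.range r).foldl (fun tbl k => tbl.set k (tbl.getD k [] ++ [c k])) cols with hprev
    have hlen : prev.length = cols.length := pv_foldl_set_length c _ cols
    have hprevr : prev.getD r [] = cols.getD r [] := by
      rw [ih hr' r (by omega)]; simp
    simp only [List.foldl_cons, List.foldl_nil]
    by_cases he : idx = r
    · subst he
      rw [List.getD_eq_getElem?_getD, List.getElem?_set]
      have hlt : idx < prev.length := by omega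
      simp only [if_pos hlt]
      rw [List.getD_eq_getElem?_getD] at hprevr
      simp [hprevr, List.getD_eq_getElem?_getD]
    · rw [List.getD_eq_getElem?_getD, List.getElem?_set, if_neg (fun h => he h.symm),
        ← List.getD_eq_getElem?_getD, ih hr' idx hidx]
      have : idx < r + 1 ↔ idx < r := by omega
      simp [this]

theorem pv_csFold_length (r : Nat) (cs : List (Nat → String)) (cols : List (List String)) :
    (cs.foldl (fun tbl c => pvStepR r c tbl) cols).length = cols.length := by
  induction cs generalizing cols with
  | nil => rfl
  | cons c cs ih => simp [List.foldl_cons, ih, pvStepR_length]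

theorem pv_csFold_getD (r : Nat) (cs : List (Nat → String)) (cols : List (List String)) (idx : Nat)
    (hlen : cols.length = r) (hidx : idx < r) :
    (cs.foldl (fun tbl c => pvStepR r c tbl) cols).getD idx []
      = cols.getD idx [] ++ cs.map (fun c => c idx) := by
  induction cs generalizing cols with
  | nil => simp
  | cons c cs ih =>
    rw [List.foldl_cons, ih _ (by rw [pvStepR_length, hlen])]
    rw [pvStepR_getD r c cols (by omega) idx (by omega)]
    simp [hidx]

theorem pv_maxEq (oList : List String) (h : oList ≠ []) :
    ((PySem.List.max? oList (fun w => w.length)).getD "").length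
      = (PySem.List.max? (oList.map String.length) (fun x => x)).getD 0 := by
  cases hA : PySem.List.max? oList (fun w => w.length) with
  | none => exact absurd ((PySem.List.max?_eq_none_iff _ _).mp hA) h
  | some m =>
    cases hB : PySem.List.max? (oList.map String.length) (fun x => x) with
    | none =>
      exact absurd (List.map_eq_nil_iff.mp ((PySem.List.max?_eq_none_iff _ _).mp hB)) h
    | some n =>
      simp only [Option.getD_some]
      have hmmem : m ∈ oList := PySem.List.max?_mem hA
      have hA' := PySem.List.max?_isMax hA
      have hB' := PySem.List.max?_isMax hB
      have hnmem : n ∈ oList.map String.length := PySem.List.max?_mem hB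
      obtain ⟨w, hw, hwn⟩ := List.mem_map.mp hnmem
      have h1 : m.length ≤ n := hB' m.length (List.mem_map.mpr ⟨m, hmmem, rfl⟩)
      have h2 : n ≤ m.length := hwn ▸ hA' w hw
      omega

theorem pv_max_isMax (oList : List String) (w : String) (hw : w ∈ oList) :
    w.length ≤ (PySem.List.max? (oList.map String.length) (fun x => x)).getD 0 := by
  cases hB : PySem.List.max? (oList.map String.length) (fun x => x) with
  | none =>
    have := List.map_eq_nil_iff.mp ((PySem.List.max?_eq_none_iff _ _).mp hB)
    subst this; cases hw
  | some n =>
    simpa using PySem.List.max?_isMax hB w.length (List.mem_map.mpr ⟨w, hw, rfl⟩)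

theorem pv_cellsEq (M r : Nat) (ws : List String) (hb : ∀ w ∈ ws, w.length ≤ M)
    (hr : r = if M < 20 then M else 20) : pvCellsA r ws = pvCellsB ws := by
  unfold pvCellsA pvCellsB
  apply List.flatMap_congr
  intro w hw
  apply List.map_congr_left
  intro j hj
  funext k
  unfold pvCellA pvCellB
  by_cases hm : M < 20
  · have hw20 : w.length < 20 := lt_of_le_of_lt (hb w hw) hm
    have hceil : pvCeil20 w.length ≤ 1 := by
      unfold pvCeil20
      have h39 : w.length + 19 ≤ 39 := by omega
      calc (w.length + 19) / 20 ≤ 39 / 20 := Nat.div_le_div_right h39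
        _ = 1 := by norm_num
    have hj0 : j = 0 := by
      have := List.mem_range.mp hj
      omega
    subst hj0
    simp
  · have : r = 20 := by rw [hr, if_neg hm]
    subst this
    rfl

theorem pv_fold_shape (r : Nat) (ws : List String) (init : List (List String)) :
    ws.foldl (fun tbl i =>
      (List.range (pvCeil20 i.length)).foldl (fun tbl j =>
        (List.range r).foldl (fun tbl k =>
          if j * r + k < i.length then
            tbl.set k (tbl.getD k [] ++ [pvCharAt i (j * 20 + k)])
          else
            tbl.set k (tbl.getD k [] ++ [""])) tbl) tbl) init
      = (pvCellsA r ws).foldl (fun tbl c => pvStepR r c tbl) init := by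
  rw [pvCellsA, List.foldl_flatMap]
  congr 1
  funext tbl i
  rw [List.foldl_map]
  congr 1
  funext tbl j
  unfold pvStepR pvCellA
  congr 1
  funext tbl k
  by_cases hc : j * r + k < i.length <;> simp [hc]

theorem pv_append_fold {α β : Type} (l : List α) (g : α → β) (acc : List β) :
    l.foldl (fun acc j => acc ++ [g j]) acc = acc ++ l.map g := by
  induction l generalizing acc with
  | nil => simp
  | cons x l ih => simp [List.foldl_cons, ih]

theorem pv_rows_eq (r : Nat) (ws : List String) :
    ws.foldl (fun acc w =>
        (List.range (pvCeil20 w.length)).foldl (fun acc j => acc ++ [pvRow w r j]) acc) []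
      = (pvCellsB ws).map (fun c => (List.range r).map c) := by
  have key : ∀ (acc : List (List String)),
      ws.foldl (fun acc w =>
        (List.range (pvCeil20 w.length)).foldl (fun acc j => acc ++ [pvRow w r j]) acc) acc
      = acc ++ ws.flatMap (fun w => (List.range (pvCeil20 w.length)).map (pvRow w r)) := by
    induction ws with
    | nil => simp
    | cons w ws ih =>
      intro acc
      rw [List.foldl_cons, ih, pv_append_fold]
      simp
  rw [key, pvCellsB, List.map_flatMap]
  simp only [List.nil_append, List.map_map]
  apply List.flatMap_congr
  intro w _
  apply List.map_congr_left
  intro j _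
  rfl

theorem pv_getD_map_range (r k : Nat) (c : Nat → String) (hk : k < r) :
    ((List.range r).map c).getD k "" = c k := by
  rw [List.getD_eq_getElem?_getD, List.getElem?_map, List.getElem?_range hk]
  rfl

-- ===== VERDICT (by name: the statement is the Claim_ definition above) =====
theorem mTable_spec : Claim_equal_mTable := by
  intro oList _ hpre
  show mTable oList = mTable_alt oList
  simp only [mTable, mTable_alt]
  rw [pv_maxEq oList hpre]
  set M := (PySem.List.max? (oList.map String.length) (fun x => x)).getD 0 with hMdef
  have hnt : (if M < 20 then List.replicate M ([] : List String) else List.replicate 20 [])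
      = List.replicate (if M < 20 then M else 20) [] := by
    by_cases hm : M < 20 <;> simp [hm]
  rw [hnt, List.length_replicate]
  set r := if M < 20 then M else 20 with hrdef
  rw [pv_fold_shape, pv_cellsEq M r oList (fun w hw => pv_max_isMax oList w hw) hrdef,
    pv_rows_eq]
  apply List.ext_getElem
  · simp [pv_csFold_length]
  · intro idx h1 h2
    have hid : idx < r := by simpa using h2
    have hlen : (List.replicate r ([] : List String)).length = r := by simp
    rw [← List.getD_eq_getElem _ [] h1, pv_csFold_getD r _ _ idx hlen hid]
    rw [List.getElem_map, List.getElem_range]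
    rw [List.map_map, List.getD_replicate _ hid]
    simp only [List.nil_append]
    apply List.map_congr_left
    intro c _
    exact (pv_getD_map_range r idx c hid).symm
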